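-- pv_equiv track=rewrite | github.com/cosmelab/dna-barcoding-analysis | 06_alignment/scripts/trim_alignment.py | get_contiguous_blocks
-- ===== SOURCE A (Python) =====
-- from typing import List, Tuple, Set
--
-- def get_contiguous_blocks(positions: Set[int], min_block_size: int = 1) -> List[Tuple[int, int]]:
--     """
--     Find contiguous blocks of positions to keep.
--
--     Args:
--         positions: Set of position indices to keep
--         min_block_size: Minimum block size to report
--
--     Returns:
--         List of (start, end) tuples for contiguous blocks
--     """
--     if not positions:
--         return []
--
--     sorted_positions = sorted(positions)
--     blocks = []
--     block_start = sorted_positions[0]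
--     prev_pos = sorted_positions[0]
--
--     for pos in sorted_positions[1:]:
--         if pos != prev_pos + 1:  # Gap detected
--             if prev_pos - block_start + 1 >= min_block_size:
--                 blocks.append((block_start, prev_pos + 1))
--             block_start = pos
--         prev_pos = pos
--
--     # Add final block
--     if prev_pos - block_start + 1 >= min_block_size:
--         blocks.append((block_start, prev_pos + 1))
--
--     return blocks
-- ===== SOURCE B (Python) =====
-- def get_contiguous_blocks(positions, min_block_size=1):
--     """Set-membership run detection: x is the start of a run iff x-1 is not in
--     the set; walk forward through the set to find the run's end. No sorting of
--     the full data, only the run starts are sorted."""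
--     s = set(positions)
--     blocks = []
--     for start in sorted(x for x in s if x - 1 not in s):
--         end = start
--         while end + 1 in s:
--             end += 1
--         if end - start + 1 >= min_block_size:
--             blocks.append((start, end + 1))
--     return blocks
-- ===== Notes on version B (the rewrite author's own statement) =====
-- stated objective: alternative
-- what changed: Replaces sort-then-linear-gap-scan by set-membership run detection: a position is a run start iff its predecessor is not in the set, the run end is found by walking successors through the set, and only the run starts are sorted.
import Mathlib
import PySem

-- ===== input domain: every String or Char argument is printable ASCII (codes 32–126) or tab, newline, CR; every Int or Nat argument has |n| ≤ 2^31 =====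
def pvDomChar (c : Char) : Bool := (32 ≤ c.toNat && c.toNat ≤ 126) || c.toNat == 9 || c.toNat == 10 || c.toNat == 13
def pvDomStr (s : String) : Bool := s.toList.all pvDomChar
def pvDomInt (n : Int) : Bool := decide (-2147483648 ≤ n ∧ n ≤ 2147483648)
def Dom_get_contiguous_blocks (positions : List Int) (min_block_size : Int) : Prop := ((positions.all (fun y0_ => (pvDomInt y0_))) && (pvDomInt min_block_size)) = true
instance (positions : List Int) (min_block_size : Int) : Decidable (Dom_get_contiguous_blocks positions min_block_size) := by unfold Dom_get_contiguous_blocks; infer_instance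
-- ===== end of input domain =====

-- B replaces A's sort-then-gap-scan by set-membership run detection: a position is a
-- run start iff its predecessor is not in the set, the run end is found by walking
-- successors through the set, and only the run starts are sorted.
-- Pre_ excludes lists with duplicate positions: A's parameter is annotated Set[int],
-- and on a multiset A's overlapping duplicate blocks are an artefact of sorting it.


-- ===== PORT A =====
-- `for pos in sorted_positions[1:]` with state (blocks, block_start, prev_pos)
def pvStepA (min_block_size : Int) (st : List (Int × Int) × Int × Int) (pos : Int) :
    List (Int × Int) × Int × Int :=
  match st with
  | (blocks, block_start, prev_pos) =>
    if pos ≠ prev_pos + 1 then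
      ((if prev_pos - block_start + 1 ≥ min_block_size
          then blocks ++ [(block_start, prev_pos + 1)] else blocks), pos, pos)
    else (blocks, block_start, pos)

-- the final `if … : blocks.append(…)` after the loop
def pvFinishA (min_block_size : Int) (st : List (Int × Int) × Int × Int) : List (Int × Int) :=
  match st with
  | (blocks, block_start, prev_pos) =>
    if prev_pos - block_start + 1 ≥ min_block_size
      then blocks ++ [(block_start, prev_pos + 1)] else blocks

def get_contiguous_blocks (positions : List Int) (min_block_size : Int) : List (Int × Int) :=
  if positions = [] then []
  else
    let sorted_positions := PySem.List.sorted positions (fun x => x) false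
    let first := sorted_positions.headD 0            -- sorted_positions[0] (list known nonempty)
    pvFinishA min_block_size
      (sorted_positions.tail.foldl (pvStepA min_block_size) ([], first, first))

-- ===== PORT B =====
-- `while end + 1 in s: end += 1` — fuel s.length is a totality guard only: each step
-- moves to a new element of the finite set s, so s.length steps always suffice
def pvWalk (s : PySem.Set Int) : Nat → Int → Int
  | 0, e => e
  | fuel+1, e => if PySem.Set.contains s (e + 1) then pvWalk s fuel (e + 1) else e

def get_contiguous_blocks_alt (positions : List Int) (min_block_size : Int) : List (Int × Int) :=
  let s := PySem.Set.ofList positions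
  let starts := PySem.List.sorted (s.filter (fun x => !PySem.Set.contains s (x - 1))) (fun x => x) false
  starts.foldl (fun blocks start =>
    let e := pvWalk s s.length start
    if e - start + 1 ≥ min_block_size then blocks ++ [(start, e + 1)] else blocks) []

-- ===== PRECONDITION & SPEC =====
-- Pre_ excludes lists with duplicate positions: A is declared on Set[int]; on a list with
-- duplicates A's overlapping duplicate blocks are an artefact of sorting the multiset,
-- while B treats the input as the set it is annotated to be.
def Pre_get_contiguous_blocks (positions : List Int) (min_block_size : Int) : Prop :=
  positions.Nodup
instance (positions : List Int) (min_block_size : Int) : Decidable (Pre_get_contiguous_blocks positions min_block_size) := by unfold Pre_get_contiguous_blocks; infer_instance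

def pvWitness_get_contiguous_blocks : List Int × Int := ([3, 1, 2, 7, 8], 2)

def Spec_get_contiguous_blocks (positions : List Int) (min_block_size : Int) (out : List (Int × Int)) : Prop := out = get_contiguous_blocks_alt positions min_block_size
instance (positions : List Int) (min_block_size : Int) (out : List (Int × Int)) : Decidable (Spec_get_contiguous_blocks positions min_block_size out) := by unfold Spec_get_contiguous_blocks; infer_instance

-- ===== CLAIM (what is proved, stated in full; the proofs are below) =====
def Claim_equal_get_contiguous_blocks : Prop := ∀ (positions : List Int) (min_block_size : Int), Dom_get_contiguous_blocks positions min_block_size → Pre_get_contiguous_blocks positions min_block_size → Spec_get_contiguous_blocks positions min_block_size (get_contiguous_blocks positions min_block_size)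

-- ===== LEMMAS AND PROOFS =====

-- canonical decomposition of a (strictly increasing) list into maximal consecutive runs,
-- used only by the proofs: both ports' results are pvEmit of these runs
def pvTakeRun (a : Int) : List Int → List Int × List Int
  | [] => ([], [])
  | y :: ys => if y = a + 1 then ((pvTakeRun y ys).1.cons y, (pvTakeRun y ys).2) else ([], y :: ys)

theorem pvTakeRun_snd_length (a : Int) (xs : List Int) : (pvTakeRun a xs).2.length ≤ xs.length := by
  induction xs generalizing a with
  | nil => simp [pvTakeRun]
  | cons y ys ih =>
    by_cases h : y = a + 1
    · simpa [pvTakeRun, h] using Nat.le_succ_of_le (ih y)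
    · simp [pvTakeRun, h]

def pvRunsC : List Int → List (List Int)
  | [] => []
  | x :: xs => (x :: (pvTakeRun x xs).1) :: pvRunsC (pvTakeRun x xs).2
termination_by l => l.length
decreasing_by
  have := pvTakeRun_snd_length x xs
  simp; omega

def pvEmit (min_block_size : Int) (runs : List (List Int)) : List (Int × Int) :=
  (runs.filter (fun r => min_block_size ≤ (r.length : Int))).map
    (fun r => (r.headD 0, r.getLastD 0 + 1))

-- A-side scan state, related to runs built back-to-front
def pvStepB (runs : List (List Int)) (x : Int) : List (List Int) :=
  if runs ≠ [] ∧ x = (runs.getLastD []).getLastD 0 + 1 then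
    runs.dropLast ++ [(runs.getLastD []) ++ [x]]
  else runs ++ [[x]]

theorem pvEmit_append (m : Int) (rs ss : List (List Int)) :
    pvEmit m (rs ++ ss) = pvEmit m rs ++ pvEmit m ss := by
  simp [pvEmit, List.filter_append]

theorem pvEmit_singleton (m : Int) (c : List Int) :
    pvEmit m [c] = if m ≤ (c.length : Int) then [(c.headD 0, c.getLastD 0 + 1)] else [] := by
  by_cases h : m ≤ (c.length : Int) <;> simp [pvEmit, h]

theorem pvStepB_concat (rs : List (List Int)) (c : List Int) (x : Int) :
    pvStepB (rs ++ [c]) x =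
      if x = c.getLastD 0 + 1 then rs ++ [c ++ [x]] else (rs ++ [c]) ++ [[x]] := by
  by_cases h : x = c.getLastD 0 + 1 <;> simp [pvStepB, h]

-- the A-loop invariant: A's (blocks, block_start, prev_pos) corresponds to runs rs ++ [c],
-- where c is the current consecutive run from block_start to prev_pos
theorem pv_loop (m : Int) : ∀ (xs : List Int) (rs : List (List Int)) (c : List Int)
    (bs prev : Int), c ≠ [] → c.headD 0 = bs → c.getLastD 0 = prev →
    (c.length : Int) = prev - bs + 1 →
    pvFinishA m (xs.foldl (pvStepA m) (pvEmit m rs, bs, prev)) =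
      pvEmit m (xs.foldl pvStepB (rs ++ [c]))
  | [], rs, c, bs, prev, hne, hh, hl, hlen => by
    simp only [List.foldl_nil, pvFinishA, pvEmit_append, pvEmit_singleton, hh, hl, hlen]
    by_cases h : prev - bs + 1 ≥ m <;> simp [h, ge_iff_le]
  | x :: xs, rs, c, bs, prev, hne, hh, hl, hlen => by
    rw [List.foldl_cons, List.foldl_cons, pvStepB_concat rs c x, hl]
    by_cases h : x = prev + 1
    · have hc' : (c ++ [x]) ≠ [] := by simp
      have := pv_loop m xs rs (c ++ [x]) bs x hc'
        (by cases c with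
            | nil => exact absurd rfl hne
            | cons a t => simpa using hh)
        (by simp)
        (by have := hlen; simp only [List.length_append, List.length_cons, List.length_nil]; push_cast; omega)
      simpa [pvStepA, h] using this
    · have hstep : pvStepA m (pvEmit m rs, bs, prev) x =
          (pvEmit m (rs ++ [c]), x, x) := by
        simp only [pvStepA, if_pos h, pvEmit_append, pvEmit_singleton, hh, hl, hlen]
        by_cases hm : prev - bs + 1 ≥ m <;> simp [hm, ge_iff_le]
      rw [if_neg h, hstep]
      exact pv_loop m xs (rs ++ [c]) [x] x x (by simp) (by simp) (by simp) (by simp)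

theorem pvA_eq (positions : List Int) (m : Int) :
    get_contiguous_blocks positions m =
      pvEmit m ((PySem.List.sorted positions (fun x => x) false).foldl pvStepB []) := by
  unfold get_contiguous_blocks
  by_cases hp : positions = []
  · simp [hp, pvEmit, PySem.List.sorted]
  · have hne : PySem.List.sorted positions (fun x => x) false ≠ [] := by
      intro h
      have := PySem.List.sorted_perm positions (fun x : Int => x) false
      rw [h] at this
      exact hp (this.nil_eq).symm
    simp only [if_neg hp]
    obtain ⟨p, t, hpt⟩ := List.exists_cons_of_ne_nil hne
    rw [hpt]
    have hfirst : pvStepB [] p = [] ++ [[p]] := by simp [pvStepB]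
    calc pvFinishA m (List.foldl (pvStepA m) ([], (p :: t).headD 0, (p :: t).headD 0) (p :: t).tail)
        = pvFinishA m (t.foldl (pvStepA m) (pvEmit m [], p, p)) := by simp [pvEmit]
      _ = pvEmit m (t.foldl pvStepB ([] ++ [[p]])) :=
          pv_loop m t [] [p] p p (by simp) (by simp) (by simp) (by simp)
      _ = pvEmit m ((p :: t).foldl pvStepB []) := by rw [List.foldl_cons, hfirst]

-- the back-to-front fold builds exactly the canonical runs
theorem pvFoldB_eq : ∀ (xs : List Int) (c : List Int) (rs : List (List Int)),
    xs.foldl pvStepB (rs ++ [c]) =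
      rs ++ ((c ++ (pvTakeRun (c.getLastD 0) xs).1) :: pvRunsC (pvTakeRun (c.getLastD 0) xs).2)
  | [], c, rs => by simp [pvTakeRun, pvRunsC]
  | y :: ys, c, rs => by
    rw [List.foldl_cons, pvStepB_concat]
    by_cases h : y = c.getLastD 0 + 1
    · rw [if_pos h, pvFoldB_eq ys (c ++ [y]) rs]
      simp only [List.getLastD_concat, pvTakeRun]
      rw [if_pos h]
      simp
    · rw [if_neg h, pvFoldB_eq ys [y] (rs ++ [c])]
      simp only [pvTakeRun]
      rw [if_neg h]
      rw [pvRunsC]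
      simp

theorem pvRunsC_eq_foldl (L : List Int) : L.foldl pvStepB [] = pvRunsC L := by
  cases L with
  | nil => simp [pvRunsC]
  | cons x xs =>
    have h0 : pvStepB [] x = [] ++ [[x]] := by simp [pvStepB]
    rw [List.foldl_cons, h0, pvFoldB_eq]
    simp [pvRunsC]

-- structure of pvTakeRun on a strictly increasing list: the run is an integer interval
theorem pvTakeRun_spec : ∀ (xs : List Int) (a : Int), (a :: xs).Pairwise (· < ·) →
    ∃ b : Int, a ≤ b ∧
      a :: (pvTakeRun a xs).1 = PySem.List.pyRange a (b + 1) 1 ∧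
      xs = (pvTakeRun a xs).1 ++ (pvTakeRun a xs).2 ∧
      (pvTakeRun a xs).2.Pairwise (· < ·) ∧
      (∀ z ∈ (pvTakeRun a xs).2, b + 1 < z)
  | [], a, _ => ⟨a, le_refl a, by simp [pvTakeRun, PySem.List.pyRange_one_singleton], by simp [pvTakeRun], by simp [pvTakeRun], by simp [pvTakeRun]⟩
  | y :: ys, a, hpw => by
    have hlt : ∀ z ∈ y :: ys, a < z := (List.pairwise_cons.mp hpw).1
    have hpw2 : (y :: ys).Pairwise (· < ·) := (List.pairwise_cons.mp hpw).2
    by_cases h : y = a + 1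
    · obtain ⟨b, hab, hrange, hsplit, hpwr, hgap⟩ := pvTakeRun_spec ys y hpw2
      refine ⟨b, by omega, ?_, ?_, ?_, ?_⟩
      · simp only [pvTakeRun]
        rw [if_pos h]
        rw [PySem.List.pyRange_one_cons (by omega : a < b + 1), ← h, ← hrange]
      · simp only [pvTakeRun, if_pos h]
        simpa using hsplit
      · simpa [pvTakeRun, h] using hpwr
      · simpa [pvTakeRun, h] using hgap
    · refine ⟨a, le_refl a, by simp [pvTakeRun, h, PySem.List.pyRange_one_singleton], by simp [pvTakeRun, h], by simpa [pvTakeRun, h] using hpw2, ?_⟩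
      simp only [pvTakeRun, if_neg h]
      intro z hz
      rcases List.mem_cons.mp hz with rfl | hz'
      · have := hlt z (List.mem_cons_self ..); omega
      · have h1 := hlt y (List.mem_cons_self ..)
        have h2 := (List.pairwise_cons.mp hpw2).1 z hz'
        omega

-- bundle: on a strictly increasing list, the canonical runs flatten back to the list,
-- each run is an interval whose successor is absent, and the run heads are exactly
-- the elements whose predecessor is absent
theorem pvRunsC_spec : ∀ (n : Nat) (M : List Int), M.length ≤ n → M.Pairwise (· < ·) →
    (pvRunsC M).flatten = M ∧
    (M.filter (fun x => decide ((x - 1) ∉ M)) = (pvRunsC M).map (fun r => r.headD 0)) ∧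
    (∀ r ∈ pvRunsC M, ∃ a b : Int, a ≤ b ∧ r = PySem.List.pyRange a (b + 1) 1 ∧ (b + 1) ∉ M)
  | 0, M, hlen, _ => by
    have : M = [] := List.eq_nil_of_length_eq_zero (Nat.le_zero.mp hlen)
    subst this
    refine ⟨by simp [pvRunsC], by simp [pvRunsC], by simp [pvRunsC]⟩
  | n + 1, M, hlen, hpw => by
    cases M with
    | nil => refine ⟨by simp [pvRunsC], by simp [pvRunsC], by simp [pvRunsC]⟩
    | cons x xs =>
      obtain ⟨b, hab, hrange, hsplit, hpwr, hgap⟩ := pvTakeRun_spec xs x hpw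
      have hlen2 : (pvTakeRun x xs).2.length ≤ n := by
        have := pvTakeRun_snd_length x xs
        simp at hlen; omega
      obtain ⟨ihflat, ihfilter, ihruns⟩ := pvRunsC_spec n (pvTakeRun x xs).2 hlen2 hpwr
      have hM : x :: xs = (x :: (pvTakeRun x xs).1) ++ (pvTakeRun x xs).2 := by
        rw [List.cons_append]; exact congrArg _ hsplit
      have hrunsEq : pvRunsC (x :: xs) = (x :: (pvTakeRun x xs).1) :: pvRunsC (pvTakeRun x xs).2 := by
        rw [pvRunsC]
      -- membership in the head run
      have hmemu : ∀ z, z ∈ x :: (pvTakeRun x xs).1 ↔ x ≤ z ∧ z < b + 1 := by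
        intro z; rw [hrange]; exact PySem.List.mem_pyRange_one
      have hminM : ∀ z ∈ x :: xs, x ≤ z := by
        intro z hz
        rcases List.mem_cons.mp hz with rfl | hz'
        · exact le_refl z
        · exact le_of_lt ((List.pairwise_cons.mp hpw).1 z hz')
      constructor
      · rw [hrunsEq]; simp only [List.flatten_cons, ihflat]; exact hM.symm
      constructor
      · -- filter characterisation
        rw [hrunsEq]
        set P : Int → Bool := fun z => decide ((z - 1) ∉ (x :: xs)) with hP
        conv_lhs => rw [hM]
        rw [List.filter_append]
        have hu : (x :: (pvTakeRun x xs).1).filter P = [x] := by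
          rw [List.filter_cons]
          simp only [hP]
          have hx1 : (x - 1) ∉ (x :: xs) := fun hmem => by have := hminM _ hmem; omega
          rw [if_pos (by simpa using hx1)]
          have : (pvTakeRun x xs).1.filter (fun z => decide ((z - 1) ∉ (x :: xs))) = [] := by
            rw [List.filter_eq_nil_iff]
            intro z hz
            have hz' : z ∈ x :: (pvTakeRun x xs).1 := List.mem_cons_of_mem _ hz
            have hzr := (hmemu z).mp hz'
            -- z ≥ x + 1 since z ∈ tail of a Nodup strictly increasing interval; in fact z ≠ x:
            have hzx : x + 1 ≤ z := by
              -- z ∈ (pvTakeRun x xs).1 ⊆ xs, and every element of xs exceeds x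
              have : z ∈ xs := by rw [hsplit]; exact List.mem_append_left _ hz
              have := (List.pairwise_cons.mp hpw).1 z this
              omega
            have : (z - 1) ∈ x :: (pvTakeRun x xs).1 := (hmemu (z - 1)).mpr ⟨by omega, by omega⟩
            have : (z - 1) ∈ x :: xs := by
              rw [hM]; exact List.mem_append_left _ this
            simp [this]
          rw [this]
        rw [hu]
        have hrest : (pvTakeRun x xs).2.filter P =
            (pvTakeRun x xs).2.filter (fun z => decide ((z - 1) ∉ (pvTakeRun x xs).2)) := by
          apply List.filter_congr
          intro z hz
          simp only [hP]
          have hzb := hgap z hz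
          have : ((z - 1) ∈ (x :: xs)) ↔ ((z - 1) ∈ (pvTakeRun x xs).2) := by
            rw [hM, List.mem_append]
            constructor
            · rintro (h | h)
              · exact absurd ((hmemu _).mp h) (by omega)
              · exact h
            · exact Or.inr
          simp [this]
        rw [hrest, ihfilter]
        simp
      · -- per-run interval + gap facts
        rw [hrunsEq]
        intro r hr
        rcases List.mem_cons.mp hr with rfl | hr'
        · refine ⟨x, b, hab, hrange, ?_⟩
          intro hmem
          rw [hM, List.mem_append] at hmem
          rcases hmem with h | h
          · have := (hmemu _).mp h; omega
          · have := hgap _ h; omega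
        · obtain ⟨a', b', hab', hr'', hnot⟩ := ihruns r hr'
          refine ⟨a', b', hab', hr'', ?_⟩
          -- a' ∈ r ⊆ rest, so b' + 1 > b + 1 > every element of the head run
          have ha'mem : a' ∈ (pvTakeRun x xs).2 := by
            have : a' ∈ r := by
              rw [hr'']; exact PySem.List.mem_pyRange_one.mpr ⟨le_refl _, by omega⟩
            have := List.sublist_flatten_of_mem hr'
            rw [ihflat] at this
            exact this.mem ‹a' ∈ r›
          have hba' := hgap a' ha'mem
          intro hmem
          rw [hM, List.mem_append] at hmem
          rcases hmem with h | h
          · have := (hmemu _).mp h; omega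
          · have := hgap _ h
            -- b' + 1 ∈ rest contradicts hnot
            exact hnot h
-- walking the set from the start of an interval reaches its end
theorem pvWalk_eq : ∀ (fuel : Nat) (s : PySem.Set Int) (a b : Int), a ≤ b →
    (∀ z, a ≤ z → z ≤ b → PySem.Set.contains s z = true) →
    PySem.Set.contains s (b + 1) = false →
    (b - a).toNat ≤ fuel → pvWalk s fuel a = b
  | 0, s, a, b, hab, _, _, hfuel => by
    have : a = b := by omega
    simp [pvWalk, this]
  | fuel + 1, s, a, b, hab, hin, hout, hfuel => by
    by_cases h : a = b
    · subst h
      simp only [pvWalk]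
      rw [hout]
      simp
    · have hlt : a < b := lt_of_le_of_ne hab h
      have hc : PySem.Set.contains s (a + 1) = true := hin (a + 1) (by omega) (by omega)
      simp only [pvWalk, hc, if_true]
      exact pvWalk_eq fuel s (a + 1) b (by omega) (fun z h1 h2 => hin z (by omega) h2) hout (by omega)

-- assembling the emitted blocks from the run heads
theorem pvAssemble : ∀ (runs : List (List Int)) (W : Int → Int) (m : Int),
    (∀ r ∈ runs, W (r.headD 0) = r.getLastD 0 ∧ (r.length : Int) = r.getLastD 0 - r.headD 0 + 1) →
    ((runs.map (fun r => r.headD 0)).filter (fun st => decide (W st - st + 1 ≥ m))).map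
        (fun st => (st, W st + 1)) = pvEmit m runs
  | [], W, m, _ => by simp [pvEmit]
  | r :: rs, W, m, h => by
    obtain ⟨hW, hlen⟩ := h r (List.mem_cons_self ..)
    have ih := pvAssemble rs W m (fun r' hr' => h r' (List.mem_cons_of_mem _ hr'))
    simp only [pvEmit] at ih ⊢
    have hcond : decide (W (r.headD 0) - r.headD 0 + 1 ≥ m) = decide (m ≤ (r.length : Int)) := by
      rw [hW, decide_eq_decide]
      omega
    simp only [List.map_cons, List.filter_cons, hcond]
    simp only [ge_iff_le, List.headD_eq_head?_getD, List.getLastD_eq_getLast?] at ih hW ⊢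
    by_cases hc : m ≤ (r.length : Int)
    · have hT : decide (m ≤ (r.length : Int)) = true := decide_eq_true hc
      simp [hT, hW, ih]
    · have hF : decide (m ≤ (r.length : Int)) = false := decide_eq_false hc
      simp [hF, ih]

-- ===== VERDICT (by name: the statement is the Claim_ definition above) =====
theorem get_contiguous_blocks_spec : Claim_equal_get_contiguous_blocks := by
  intro positions m _ hnd
  unfold Spec_get_contiguous_blocks
  -- notation
  set L := PySem.List.sorted positions (fun x => x) false with hL
  have hperm : L.Perm positions := PySem.List.sorted_perm positions (fun x => x) false
  have hLnd : L.Nodup := hperm.nodup_iff.mpr hnd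
  have hLpw : L.Pairwise (· < ·) := by
    have h1 : L.Pairwise (· ≤ ·) := PySem.List.sorted_pairwise positions (fun x => x)
    have h2 : L.Pairwise (· ≠ ·) := hLnd
    exact (h1.and h2).imp (fun h => lt_of_le_of_ne h.1 h.2)
  have hmemL : ∀ z, z ∈ L ↔ z ∈ positions := fun z => hperm.mem_iff
  obtain ⟨hflat, hfilter, hruns⟩ := pvRunsC_spec L.length L (le_refl _) hLpw
  -- B's set is just positions (Nodup)
  have hs : PySem.Set.ofList positions = positions := PySem.Set.ofList_eq_self_of_nodup positions hnd
  have hcont : ∀ z, PySem.Set.contains (PySem.Set.ofList positions) z = decide (z ∈ L) := by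
    intro z
    rw [Bool.eq_iff_iff]
    simp only [PySem.Set.contains_iff, decide_eq_true_eq]
    rw [hs]
    exact (hmemL z).symm
  -- B's sorted starts are the run heads
  have hstarts :
      PySem.List.sorted ((PySem.Set.ofList positions).filter
          (fun x => !PySem.Set.contains (PySem.Set.ofList positions) (x - 1))) (fun x => x) false
        = (pvRunsC L).map (fun r => r.headD 0) := by
    rw [← hfilter]
    apply PySem.List.sorted_eq_of_perm_of_pairwise_lt
    · -- the filtered sorted list is a permutation of the filtered input
      have h1 : L.filter (fun x => decide ((x - 1) ∉ L)) =
          L.filter (fun x => !PySem.Set.contains (PySem.Set.ofList positions) (x - 1)) := by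
        apply List.filter_congr
        intro z _
        rw [hcont]
        simp
      rw [h1, hs]
      exact hperm.filter _
    · exact List.Pairwise.filter _ hLpw
  -- the walk from each run head reaches the run's last element
  have hWalk : ∀ r ∈ pvRunsC L,
      pvWalk (PySem.Set.ofList positions) (PySem.Set.ofList positions).length (r.headD 0) = r.getLastD 0 ∧
      (r.length : Int) = r.getLastD 0 - r.headD 0 + 1 := by
    intro r hr
    obtain ⟨a, b, hab, hreq, hnot⟩ := hruns r hr
    have hhead : r.headD 0 = a := by
      rw [hreq, PySem.List.pyRange_one_cons (by omega : a < b + 1)]; rfl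
    have hlast : r.getLastD 0 = b := by
      rw [hreq, PySem.List.pyRange_one_succ_right hab, List.getLastD_concat]
    have hlen : (r.length : Int) = b - a + 1 := by
      rw [hreq, PySem.List.length_pyRange_one]; omega
    have hsubL : ∀ z, a ≤ z → z ≤ b → z ∈ L := by
      intro z h1 h2
      have hz : z ∈ r := by rw [hreq]; exact PySem.List.mem_pyRange_one.mpr ⟨h1, by omega⟩
      have hz' : z ∈ (pvRunsC L).flatten := (List.sublist_flatten_of_mem hr).mem hz
      rwa [hflat] at hz'
    have hlenL : (b - a).toNat ≤ (PySem.Set.ofList positions).length := by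
      have h1 : r.length ≤ L.length := ((List.sublist_flatten_of_mem hr).length_le).trans (by rw [hflat])
      have h2 : (PySem.Set.ofList positions).length = L.length := by
        rw [hs, hperm.length_eq]
      omega
    refine ⟨?_, by rw [hhead, hlast]; exact hlen⟩
    rw [hhead, hlast]
    apply pvWalk_eq _ _ a b hab
    · intro z h1 h2
      rw [hcont]; simpa using hsubL z h1 h2
    · rw [hcont]; simpa using hnot
    · exact hlenL
  -- assemble both sides
  rw [pvA_eq, ← hL, pvRunsC_eq_foldl]
  unfold get_contiguous_blocks_alt
  simp only []
  rw [hstarts]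
  rw [show (fun (blocks : List (Int × Int)) (start : Int) =>
        let e := pvWalk (PySem.Set.ofList positions) (PySem.Set.ofList positions).length start;
        if e - start + 1 ≥ m then blocks ++ [(start, e + 1)] else blocks) =
      (fun blocks start =>
        if (fun st => decide (pvWalk (PySem.Set.ofList positions) (PySem.Set.ofList positions).length st - st + 1 ≥ m)) start
        then blocks ++ [(fun st => (st, pvWalk (PySem.Set.ofList positions) (PySem.Set.ofList positions).length st + 1)) start]
        else blocks) from by funext blocks start; simp]
  rw [PySem.List.foldl_append_if]
  rw [List.nil_append]
  exact (pvAssemble (pvRunsC L) _ m (fun r hr => hWalk r hr)).symm
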